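-- pv_equiv track=rewrite | github.com/Belerin87/TibiaSprites | scripts/download_tibiawiki_assets.py | build_fandom_gif_file
-- ===== SOURCE A (Python) =====
-- def build_fandom_gif_file(name: str) -> str | None:
--     """
--     Python port of your Node buildWikiGifFile().
--     Produces "The_Voice_of_Ruin.gif" style names.
--     """
--     if not name:
--         return None
--
--     # normalize whitespace
--     s = " ".join(str(name).strip().split())
--
--     LOWER = {"a", "an", "the", "of", "in", "on", "to", "and", "with", "from"}
--
--     words = s.split(" ")
--     out_words = []
--     for i, w in enumerate(words):
--         segs = w.split("-")
--         segs2 = []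
--         for seg in segs:
--             if not seg:
--                 segs2.append(seg)
--                 continue
--             segs2.append(seg[:1].upper() + seg[1:].lower())
--         out = "-".join(segs2)
--         if i > 0 and out.lower() in LOWER:
--             out = out.lower()
--         out_words.append(out)
--
--     s2 = " ".join(out_words).replace(" ", "_")
--     return f"{s2}.gif"
-- ===== SOURCE B (Python) =====
-- LOWER = {"a", "an", "the", "of", "in", "on", "to", "and", "with", "from"}
--
--
-- def build_fandom_gif_file(name: str) -> str | None:
--     if not name:
--         return None
--     words = str(name).split()
--     out_words = []
--     for i, w in enumerate(words):
--         # one char-level pass: capitalize at word start and after '-', lowercase elsewhere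
--         cap = []
--         start = True
--         for ch in w:
--             if ch == "-":
--                 cap.append(ch)
--                 start = True
--             else:
--                 cap.append(ch.upper() if start else ch.lower())
--                 start = False
--         c = "".join(cap)
--         if i > 0 and w.lower() in LOWER:
--             c = w.lower()
--         out_words.append(c)
--     return "_".join(out_words) + ".gif"
-- ===== Notes on version B (the rewrite author's own statement) =====
-- stated objective: simpler
-- what changed: B drops A's strip/split/join/re-split whitespace normalization in favour of a single str.split(), and replaces the nested per-word hyphen-segment split/capitalize/rejoin loop by one character-level state-machine pass per word, joining the words directly with underscores instead of joining with spaces and then substituting underscores for the spaces.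
import Mathlib
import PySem

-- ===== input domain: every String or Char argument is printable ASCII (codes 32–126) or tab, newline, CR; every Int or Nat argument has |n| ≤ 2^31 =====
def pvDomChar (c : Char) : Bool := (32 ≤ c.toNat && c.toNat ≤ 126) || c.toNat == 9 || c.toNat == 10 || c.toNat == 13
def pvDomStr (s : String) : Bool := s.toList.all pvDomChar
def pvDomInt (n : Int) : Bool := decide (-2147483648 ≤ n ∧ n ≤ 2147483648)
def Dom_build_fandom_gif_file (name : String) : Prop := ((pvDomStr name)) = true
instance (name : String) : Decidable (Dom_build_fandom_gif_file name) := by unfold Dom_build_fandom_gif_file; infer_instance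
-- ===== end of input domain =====

-- B replaces A's join-then-resplit whitespace normalization and the nested per-word
-- hyphen-segment split/capitalize/rejoin loop by a single split() plus one char-level
-- state-machine pass per word, joining directly with '_' (objective: simpler; same result).

-- Python's LOWER set literal (ten distinct strings), used by both programs
def pyLOWER : PySem.Set (List Char) :=
  PySem.Set.ofList [['a'], ['a','n'], ['t','h','e'], ['o','f'], ['i','n'], ['o','n'],
    ['t','o'], ['a','n','d'], ['w','i','t','h'], ['f','r','o','m']]

-- ===== PORT A =====
def build_fandom_gif_file (name : String) : Option String :=
  if name = "" then none
  else
    let s := PySem.Chars.join [' '] (PySem.Chars.split₀ (PySem.Chars.strip name.toList))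
    let words := PySem.Chars.splitOn s [' ']
    let out_words := (PySem.List.enumerate words).foldl (fun (acc : List (List Char)) iw =>
      let segs := PySem.Chars.splitOn iw.2 ['-']
      let segs2 := segs.foldl (fun (a : List (List Char)) seg =>
        if seg.isEmpty then a ++ [seg]
        else a ++ [PySem.Chars.upper (PySem.Chars.slice seg none (some 1)) ++
                   PySem.Chars.lower (PySem.Chars.slice seg (some 1) none)]) []
      let out := PySem.Chars.join ['-'] segs2
      let out2 := if (decide (0 < iw.1) && pyLOWER.contains (PySem.Chars.lower out)) = true
                  then PySem.Chars.lower out else out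
      acc ++ [out2]) []
    let s2 := PySem.Chars.replace (PySem.Chars.join [' '] out_words) [' '] ['_']
    some (String.ofList (s2 ++ ".gif".toList))

-- ===== PORT B =====
-- one char-level pass over a word: capitalize at the start and after '-', lowercase elsewhere
def capWordB (w : List Char) : List Char :=
  (w.foldl (fun (p : List Char × Bool) ch =>
      if ch = '-' then (p.1 ++ [ch], true)
      else (p.1 ++ [if p.2 then PySem.Chars.upperChar ch else PySem.Chars.lowerChar ch], false))
    ([], true)).1

def build_fandom_gif_file_alt (name : String) : Option String :=
  if name = "" then none
  else
    let words := PySem.Chars.split₀ name.toList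
    let out_words := (PySem.List.enumerate words).foldl (fun (acc : List (List Char)) iw =>
      let c := capWordB iw.2
      let c2 := if (decide (0 < iw.1) && pyLOWER.contains (PySem.Chars.lower iw.2)) = true
                then PySem.Chars.lower iw.2 else c
      acc ++ [c2]) []
    some (String.ofList (PySem.Chars.join ['_'] out_words ++ ".gif".toList))

-- ===== PRECONDITION & SPEC =====
def Spec_build_fandom_gif_file (name : String) (out : Option String) : Prop := out = build_fandom_gif_file_alt name
instance (name : String) (out : Option String) : Decidable (Spec_build_fandom_gif_file name out) := by unfold Spec_build_fandom_gif_file; infer_instance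

-- ===== CLAIM (what is proved, stated in full; the proofs are below) =====
def Claim_equal_build_fandom_gif_file : Prop := ∀ (name : String), Dom_build_fandom_gif_file name → Spec_build_fandom_gif_file name (build_fandom_gif_file name)

-- ===== LEMMAS AND PROOFS =====
lemma char_le_toNat {a b : Char} : a ≤ b ↔ a.toNat ≤ b.toNat := by
  rw [Char.le_def, UInt32.le_iff_toNat_le]; rfl
lemma toNat_ofNat_valid {n : ℕ} (h : n < 55296) : (Char.ofNat n).toNat = n := by
  rw [Char.toNat_ofNat]; simp [Nat.isValidChar, h]
lemma nA : 'A'.toNat = 65 := rfl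
lemma nZ : 'Z'.toNat = 90 := rfl
lemma lowerChar_upperChar (c : Char) : PySem.Chars.lowerChar (PySem.Chars.upperChar c) = PySem.Chars.lowerChar c := by
  simp only [PySem.Chars.upperChar, PySem.Chars.lowerChar, PySem.Chars.islower, PySem.Chars.isupper]
  by_cases hl : 'a' ≤ c ∧ c ≤ 'z'
  · have h1 : 97 ≤ c.toNat := char_le_toNat.1 hl.1
    have h2 : c.toNat ≤ 122 := char_le_toNat.1 hl.2
    have hv : (Char.ofNat (c.toNat - 32)).toNat = c.toNat - 32 := toNat_ofNat_valid (by omega)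
    have hu1 : 'A' ≤ Char.ofNat (c.toNat - 32) := char_le_toNat.2 (by rw [hv, nA]; omega)
    have hu2 : Char.ofNat (c.toNat - 32) ≤ 'Z' := char_le_toNat.2 (by rw [hv, nZ]; omega)
    have hnl : ¬ ('A' ≤ c ∧ c ≤ 'Z') := by
      intro h; have := char_le_toNat.1 h.2; rw [nZ] at this; omega
    have e1 : (decide ('a' ≤ c) && decide (c ≤ 'z')) = true := by simp only [Bool.and_eq_true, decide_eq_true_eq]; exact ⟨hl.1, hl.2⟩
    have e2 : (decide ('A' ≤ Char.ofNat (c.toNat - 32)) && decide (Char.ofNat (c.toNat - 32) ≤ 'Z')) = true := by simp only [Bool.and_eq_true, decide_eq_true_eq]; exact ⟨hu1, hu2⟩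
    have e3 : (decide ('A' ≤ c) && decide (c ≤ 'Z')) = false := by simpa using hnl
    simp only [e1, if_true]
    simp only [e2, e3, if_true, Bool.false_eq_true, if_false]
    apply Char.ext
    have : (Char.ofNat ((Char.ofNat (c.toNat - 32)).toNat + 32)).toNat = c.toNat := by
      rw [hv, toNat_ofNat_valid (by omega)]; omega
    have h' := congrArg Char.ofNat this
    rw [Char.ofNat_toNat, Char.ofNat_toNat] at h'
    exact congrArg Char.val h'
  · simp [hl]
lemma lowerChar_lowerChar (c : Char) : PySem.Chars.lowerChar (PySem.Chars.lowerChar c) = PySem.Chars.lowerChar c := by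
  simp only [PySem.Chars.lowerChar, PySem.Chars.isupper]
  by_cases hu : 'A' ≤ c ∧ c ≤ 'Z'
  · have h1 : 65 ≤ c.toNat := char_le_toNat.1 hu.1
    have h2 : c.toNat ≤ 90 := char_le_toNat.1 hu.2
    have hv : (Char.ofNat (c.toNat + 32)).toNat = c.toNat + 32 := toNat_ofNat_valid (by omega)
    have hn : ¬ ('A' ≤ Char.ofNat (c.toNat + 32) ∧ Char.ofNat (c.toNat + 32) ≤ 'Z') := by
      intro h; have := char_le_toNat.1 h.2; rw [hv, nZ] at this; omega
    have e1 : (decide ('A' ≤ c) && decide (c ≤ 'Z')) = true := by simp only [Bool.and_eq_true, decide_eq_true_eq]; exact ⟨hu.1, hu.2⟩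
    have e2 : (decide ('A' ≤ Char.ofNat (c.toNat + 32)) && decide (Char.ofNat (c.toNat + 32) ≤ 'Z')) = false := by simpa using hn
    simp only [e1, if_true]
    simp only [e2, Bool.false_eq_true, if_false]
  · simp [hu]
lemma upperChar_ne_32 {c : Char} (h : c.toNat ≠ 32) : (PySem.Chars.upperChar c).toNat ≠ 32 := by
  simp only [PySem.Chars.upperChar, PySem.Chars.islower]
  split_ifs with hl
  · rw [Bool.and_eq_true, decide_eq_true_eq, decide_eq_true_eq] at hl
    have h1 : 97 ≤ c.toNat := char_le_toNat.1 hl.1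
    have h2 : c.toNat ≤ 122 := char_le_toNat.1 hl.2
    rw [toNat_ofNat_valid (by omega)]; omega
  · exact h
lemma lowerChar_ne_32 {c : Char} (h : c.toNat ≠ 32) : (PySem.Chars.lowerChar c).toNat ≠ 32 := by
  simp only [PySem.Chars.lowerChar, PySem.Chars.isupper]
  split_ifs with hl
  · rw [Bool.and_eq_true, decide_eq_true_eq, decide_eq_true_eq] at hl
    have h1 : 65 ≤ c.toNat := char_le_toNat.1 hl.1
    have h2 : c.toNat ≤ 90 := char_le_toNat.1 hl.2
    rw [toNat_ofNat_valid (by omega)]; omega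
  · exact h


lemma splitOn_go_spec (c : Char) : ∀ (l : List Char) (fuel : ℕ), l.length < fuel →
    ∀ (cur : List Char) (acc : List (List Char)),
    PySem.Chars.splitOn.go [c] fuel l cur acc
      = acc.reverse ++ (List.splitOnP (· == c) l).modifyHead (cur.reverse ++ ·) := by
  intro l
  induction l with
  | nil =>
    intro fuel hf cur acc
    match fuel, hf with
    | fuel+1, _ =>
      rw [PySem.Chars.splitOn.go]
      all_goals first | omega | simp [List.splitOnP_nil]
  | cons ch rest ih =>
    intro fuel hf cur acc
    match fuel, hf with
    | fuel+1, hf =>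
      rw [PySem.Chars.splitOn.go]
      by_cases hc : ch = c
      · subst hc
        have hp : [ch].isPrefixOf (ch :: rest) = true := by simp [List.isPrefixOf]
        simp only [hp, if_true, List.length_nil, List.length_cons, Nat.zero_add,
          List.drop_succ_cons, List.drop_zero] at *
        rw [ih fuel (by omega) [] (cur.reverse :: acc)]
        simp [List.splitOnP_cons]
        exact congrFun List.modifyHead_id _
      · have hp : [c].isPrefixOf (ch :: rest) = false := by
          simp [List.isPrefixOf]; exact fun h => absurd h.symm hc
        simp only [hp, Bool.false_eq_true, if_false, List.length_cons] at *
        rw [ih fuel (by omega) (ch :: cur) acc]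
        rw [List.splitOnP_cons]
        simp only [beq_iff_eq, hc, if_false, List.modifyHead_modifyHead]
        have hfun : ((fun x => cur.reverse ++ x) ∘ List.cons ch) = (fun x => (ch :: cur).reverse ++ x) := by
          funext x; simp
        rw [hfun]

lemma splitOn_single (s : List Char) (c : Char) :
    PySem.Chars.splitOn s [c] = List.splitOn c s := by
  rw [PySem.Chars.splitOn, splitOn_go_spec c s (s.length + 1) (by omega) [] []]
  have : ((fun x => List.reverse [] ++ x) : List Char → List Char) = id := by funext x; simp
  rw [this, List.modifyHead_id]
  rfl

lemma rep_go_spec : ∀ (l : List Char) (fuel : ℕ), l.length ≤ fuel → ∀ (acc : List Char),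
    PySem.Chars.replace.go [' '] ['_'] fuel l acc
      = acc.reverse ++ l.map (fun c => if c = ' ' then '_' else c) := by
  intro l
  induction l with
  | nil =>
    intro fuel _ acc
    cases fuel <;> rw [PySem.Chars.replace.go] <;> simp
  | cons ch rest ih =>
    intro fuel hf acc
    match fuel, hf with
    | fuel+1, hf =>
      rw [PySem.Chars.replace.go]
      by_cases hc : ch = ' '
      · subst hc
        have hp : [' '].isPrefixOf (' ' :: rest) = true := by simp [List.isPrefixOf]
        simp only [hp, if_true, List.length_nil, List.length_cons, Nat.zero_add,
          List.drop_succ_cons, List.drop_zero]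
        rw [ih fuel (by simpa using hf) (['_'].reverse ++ acc)]
        simp
      · have hp : [' '].isPrefixOf (ch :: rest) = false := by
          simp [List.isPrefixOf]; exact fun h => absurd h.symm hc
        simp only [hp, Bool.false_eq_true, if_false]
        rw [ih fuel (by simpa using hf) (ch :: acc)]
        simp [hc]

lemma replace_map (s : List Char) :
    PySem.Chars.replace s [' '] ['_'] = s.map (fun c => if c = ' ' then '_' else c) := by
  rw [PySem.Chars.replace]
  simp only [List.isEmpty_cons, Bool.false_eq_true, if_false]
  exact rep_go_spec s s.length (le_refl _) []


lemma split0_go_cons (c : Char) (rest cur : List Char) (acc : List (List Char)) :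
    PySem.Chars.split₀.go (c :: rest) cur acc
      = if PySem.Chars.isspace c = true then
          (if cur.isEmpty then PySem.Chars.split₀.go rest [] acc
           else PySem.Chars.split₀.go rest [] (cur.reverse :: acc))
        else PySem.Chars.split₀.go rest (c :: cur) acc := rfl

lemma split0_go_nil (cur : List Char) (acc : List (List Char)) :
    PySem.Chars.split₀.go [] cur acc
      = if cur.isEmpty then acc.reverse else (cur.reverse :: acc).reverse := rfl

lemma split0_go_lstrip : ∀ (l : List Char) (acc : List (List Char)),
    PySem.Chars.split₀.go (List.dropWhile PySem.Chars.isspace l) [] acc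
      = PySem.Chars.split₀.go l [] acc := by
  intro l
  induction l with
  | nil => intro acc; rfl
  | cons c rest ih =>
    intro acc
    by_cases hc : PySem.Chars.isspace c = true
    · rw [List.dropWhile_cons_of_pos hc, ih acc, split0_go_cons]
      simp [hc]
    · rw [List.dropWhile_cons_of_neg hc]

lemma split0_go_allspace : ∀ (sp : List Char), (∀ c ∈ sp, PySem.Chars.isspace c = true) →
    ∀ (cur : List Char) (acc : List (List Char)),
    PySem.Chars.split₀.go sp cur acc = PySem.Chars.split₀.go [] cur acc := by
  intro sp
  induction sp with
  | nil => intro _ _ _; rfl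
  | cons c rest ih =>
    intro h cur acc
    have hc : PySem.Chars.isspace c = true := h c (by simp)
    rw [split0_go_cons]
    simp only [hc, if_true]
    by_cases hcur : cur.isEmpty = true
    · rw [if_pos hcur, ih (fun x hx => h x (by simp [hx]))]
      rw [split0_go_nil, split0_go_nil]
      simp [hcur]
    · rw [if_neg hcur, ih (fun x hx => h x (by simp [hx]))]
      rw [split0_go_nil, split0_go_nil]
      simp [hcur]

lemma split0_go_rstrip : ∀ (l sp : List Char), (∀ c ∈ sp, PySem.Chars.isspace c = true) →
    ∀ (cur : List Char) (acc : List (List Char)),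
    PySem.Chars.split₀.go (l ++ sp) cur acc = PySem.Chars.split₀.go l cur acc := by
  intro l
  induction l with
  | nil =>
    intro sp h cur acc
    simpa using split0_go_allspace sp h cur acc
  | cons c rest ih =>
    intro sp h cur acc
    rw [List.cons_append, split0_go_cons, split0_go_cons]
    by_cases hc : PySem.Chars.isspace c = true
    · simp only [hc, if_true]
      by_cases hcur : cur.isEmpty = true
      · rw [if_pos hcur, if_pos hcur, ih sp h]
      · rw [if_neg hcur, if_neg hcur, ih sp h]
    · simp only [hc, Bool.false_eq_true, if_false]
      exact ih sp h _ _

lemma split₀_strip (s : List Char) :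
    PySem.Chars.split₀ (PySem.Chars.strip s) = PySem.Chars.split₀ s := by
  rw [PySem.Chars.split₀, PySem.Chars.split₀, PySem.Chars.strip, PySem.Chars.lstrip,
    PySem.Chars.rstrip]
  have h1 : (List.dropWhile PySem.Chars.isspace ((List.dropWhile PySem.Chars.isspace s).reverse)).reverse
      ++ (List.takeWhile PySem.Chars.isspace ((List.dropWhile PySem.Chars.isspace s).reverse)).reverse
      = List.dropWhile PySem.Chars.isspace s := by
    rw [← List.reverse_append, List.takeWhile_append_dropWhile, List.reverse_reverse]
  calc PySem.Chars.split₀.go (List.dropWhile PySem.Chars.isspace ((List.dropWhile PySem.Chars.isspace s).reverse)).reverse [] []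
      = PySem.Chars.split₀.go ((List.dropWhile PySem.Chars.isspace ((List.dropWhile PySem.Chars.isspace s).reverse)).reverse
          ++ (List.takeWhile PySem.Chars.isspace ((List.dropWhile PySem.Chars.isspace s).reverse)).reverse) [] [] := by
        rw [split0_go_rstrip _ _ (fun c hc => List.mem_takeWhile_imp (List.mem_reverse.mp hc)) [] []]
    _ = PySem.Chars.split₀.go (List.dropWhile PySem.Chars.isspace s) [] [] := by rw [h1]
    _ = PySem.Chars.split₀.go s [] [] := split0_go_lstrip s []

lemma split₀_nospace_go : ∀ (l cur : List Char) (acc : List (List Char)),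
    (∀ t ∈ acc, ∀ c ∈ t, PySem.Chars.isspace c = false) →
    (∀ c ∈ cur, PySem.Chars.isspace c = false) →
    ∀ t ∈ PySem.Chars.split₀.go l cur acc, ∀ c ∈ t, PySem.Chars.isspace c = false := by
  intro l
  induction l with
  | nil =>
    intro cur acc hacc hcur
    rw [split0_go_nil]
    split_ifs
    · intro t ht; exact hacc t (List.mem_reverse.mp ht)
    · intro t ht
      rcases List.mem_cons.mp (List.mem_reverse.mp ht) with h | h
      · subst h; intro c hcm; exact hcur c (List.mem_reverse.mp hcm)
      · exact hacc t h
  | cons ch rest ih =>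
    intro cur acc hacc hcur
    rw [split0_go_cons]
    by_cases hc : PySem.Chars.isspace ch = true
    · simp only [hc, if_true]
      by_cases hcur' : cur.isEmpty = true
      · rw [if_pos hcur']
        exact ih [] acc hacc (by simp)
      · rw [if_neg hcur']
        refine ih [] (cur.reverse :: acc) ?_ (by simp)
        intro t ht
        rcases List.mem_cons.mp ht with h | h
        · subst h; intro c hcm; exact hcur c (List.mem_reverse.mp hcm)
        · exact hacc t h
    · simp only [hc, Bool.false_eq_true, if_false]
      refine ih (ch :: cur) acc hacc ?_
      intro c hcm
      rcases List.mem_cons.mp hcm with h | h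
      · subst h; exact Bool.eq_false_iff.mpr hc
      · exact hcur c h

lemma split₀_nospace (s : List Char) :
    ∀ t ∈ PySem.Chars.split₀ s, ∀ c ∈ t, PySem.Chars.isspace c = false := by
  rw [PySem.Chars.split₀]
  exact split₀_nospace_go s [] [] (by simp) (by simp)


def capRec : Bool → List Char → List Char
  | _, [] => []
  | st, ch :: t =>
    if ch = '-' then '-' :: capRec true t
    else (if st then PySem.Chars.upperChar ch else PySem.Chars.lowerChar ch) :: capRec false t

def capA (seg : List Char) : List Char :=
  if seg.isEmpty then seg
  else PySem.Chars.upper (PySem.Chars.slice seg none (some 1)) ++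
       PySem.Chars.lower (PySem.Chars.slice seg (some 1) none)

lemma capRec_false_lower (t : List Char) (h : '-' ∉ t) :
    capRec false t = PySem.Chars.lower t := by
  induction t with
  | nil => rfl
  | cons c r ih =>
    rw [capRec, if_neg (fun hc => h (by rw [hc]; exact List.mem_cons_self ..))]
    rw [PySem.Chars.lower, List.map_cons, ih (fun hm => h (List.mem_cons_of_mem _ hm))]
    rfl

lemma capA_eq (seg : List Char) (h : '-' ∉ seg) : capA seg = capRec true seg := by
  cases seg with
  | nil => rfl
  | cons c t =>
    rw [capA]
    simp only [List.isEmpty_cons, Bool.false_eq_true, if_false]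
    simp only [PySem.Chars.slice_eq_listSlice]
    rw [PySem.List.slice_to _ (by norm_num : (0:ℤ) ≤ 1), PySem.List.slice_from _ (by norm_num : (0:ℤ) ≤ 1)]
    rw [capRec, if_neg (fun hc => h (by rw [hc]; exact List.mem_cons_self ..)),
      capRec_false_lower t (fun hm => h (List.mem_cons_of_mem _ hm))]
    rfl

lemma capRec_append (s : List Char) (h : '-' ∉ s) (st : Bool) (r : List Char) :
    capRec st (s ++ '-' :: r) = capRec st s ++ '-' :: capRec true r := by
  induction s generalizing st with
  | nil => simp [capRec]
  | cons c t ih =>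
    have hc : c ≠ '-' := fun hc => h (by rw [hc]; exact List.mem_cons_self ..)
    rw [List.cons_append, capRec, if_neg hc, capRec, if_neg hc,
      ih (fun hm => h (List.mem_cons_of_mem _ hm)) false, List.cons_append]

lemma capRec_join (segs : List (List Char)) (hne : segs ≠ [])
    (h : ∀ s ∈ segs, '-' ∉ s) :
    capRec true (PySem.Chars.join ['-'] segs) = PySem.Chars.join ['-'] (segs.map (capRec true)) := by
  induction segs with
  | nil => exact absurd rfl hne
  | cons a rest ih =>
    cases rest with
    | nil => simp [PySem.Chars.join_singleton]
    | cons b r =>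
      rw [PySem.Chars.join_cons_cons, List.map_cons, List.map_cons, PySem.Chars.join_cons_cons]
      have := capRec_append a (h a (by simp)) true (PySem.Chars.join ['-'] (b :: r))
      rw [List.append_assoc, List.singleton_append, this,
        ih (by simp) (fun s hs => h s (List.mem_cons_of_mem _ hs))]
      simp

lemma splitOnP_forall {α : Type} (p : α → Bool) (l : List α) :
    ∀ t ∈ List.splitOnP p l, ∀ x ∈ t, p x = false := by
  induction l with
  | nil => simp [List.splitOnP_nil]
  | cons a as ih =>
    rw [List.splitOnP_cons]
    by_cases ha : p a = true
    · simp only [ha, if_true]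
      intro t ht
      rcases List.mem_cons.mp ht with h | h
      · subst h; simp
      · exact ih t h
    · simp only [ha, Bool.false_eq_true, if_false]
      intro t ht
      rcases (List.exists_cons_of_ne_nil (List.splitOnP_ne_nil p as)) with ⟨h0, r0, he⟩
      rw [he, List.modifyHead_cons] at ht
      rcases List.mem_cons.mp ht with h | h
      · subst h
        intro x hx
        rcases List.mem_cons.mp hx with h | h
        · subst h; exact Bool.eq_false_iff.mpr ha
        · exact ih h0 (he ▸ List.mem_cons_self ..) x h
      · exact ih t (he ▸ List.mem_cons_of_mem _ h)

lemma splitOn_dashfree (w : List Char) : ∀ t ∈ List.splitOn '-' w, '-' ∉ t := by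
  intro t ht hm
  have := splitOnP_forall (· == '-') w t ht '-' hm
  simp at this

lemma word_eq (w : List Char) :
    PySem.Chars.join ['-'] ((List.splitOn '-' w).map capA) = capRec true w := by
  conv_rhs => rw [← List.intercalate_splitOn w '-']
  have hne : List.splitOn '-' w ≠ [] := List.splitOnP_ne_nil (· == '-') w
  have hdf := splitOn_dashfree w
  rw [show ([('-' : Char)].intercalate (List.splitOn '-' w)) = PySem.Chars.join ['-'] (List.splitOn '-' w) from rfl]
  rw [capRec_join _ hne hdf]
  congr 1
  exact List.map_congr_left (fun s hs => capA_eq s (hdf s hs))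


lemma char_toNat_inj {c d : Char} (h : c.toNat = d.toNat) : c = d := by
  rw [← Char.ofNat_toNat c, ← Char.ofNat_toNat d, h]

lemma upperChar_ne_space {c : Char} (h : c ≠ ' ') : PySem.Chars.upperChar c ≠ ' ' :=
  fun he => upperChar_ne_32 (fun ht => h (char_toNat_inj ht)) (congrArg Char.toNat he)

lemma lowerChar_ne_space {c : Char} (h : c ≠ ' ') : PySem.Chars.lowerChar c ≠ ' ' :=
  fun he => lowerChar_ne_32 (fun ht => h (char_toNat_inj ht)) (congrArg Char.toNat he)

lemma lower_capRec (w : List Char) (st : Bool) :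
    PySem.Chars.lower (capRec st w) = PySem.Chars.lower w := by
  induction w generalizing st with
  | nil => rfl
  | cons c t ih =>
    simp only [PySem.Chars.lower] at ih ⊢
    by_cases hc : c = '-'
    · subst hc; simp [capRec, ih]
    · simp only [capRec, hc, if_false, List.map_cons, ih]
      congr 1
      cases st
      · simp only [Bool.false_eq_true, if_false]; exact lowerChar_lowerChar c
      · exact lowerChar_upperChar c

lemma capRec_nospace (w : List Char) (h : ∀ c ∈ w, c ≠ ' ') (st : Bool) :
    ∀ c ∈ capRec st w, c ≠ ' ' := by
  induction w generalizing st with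
  | nil => intro c hc; simp [capRec] at hc
  | cons a t ih =>
    intro c hc
    by_cases ha : a = '-'
    · subst ha
      rw [capRec, if_pos rfl] at hc
      rcases List.mem_cons.mp hc with h0 | h0
      · subst h0; decide
      · exact ih (fun x hx => h x (List.mem_cons_of_mem _ hx)) true c h0
    · rw [capRec, if_neg ha] at hc
      rcases List.mem_cons.mp hc with h0 | h0
      · subst h0
        have hne := h a (List.mem_cons_self ..)
        cases st with
        | true => simpa using upperChar_ne_space hne
        | false => simpa using lowerChar_ne_space hne
      · exact ih (fun x hx => h x (List.mem_cons_of_mem _ hx)) false c h0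

lemma lower_nospace (w : List Char) (h : ∀ c ∈ w, c ≠ ' ') :
    ∀ c ∈ PySem.Chars.lower w, c ≠ ' ' := by
  intro c hc
  obtain ⟨x, hx, rfl⟩ := List.mem_map.mp hc
  exact lowerChar_ne_space (h x hx)

def capSt : Bool → List Char → Bool
  | st, [] => st
  | _, ch :: t => if ch = '-' then capSt true t else capSt false t

lemma capB_fold (w : List Char) : ∀ (acc : List Char) (st : Bool),
    (w.foldl (fun (p : List Char × Bool) ch =>
        if ch = '-' then (p.1 ++ [ch], true)
        else (p.1 ++ [if p.2 then PySem.Chars.upperChar ch else PySem.Chars.lowerChar ch], false))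
      (acc, st)) = (acc ++ capRec st w, capSt st w) := by
  induction w with
  | nil => intro acc st; simp [capRec, capSt]
  | cons c t ih =>
    intro acc st
    rw [List.foldl_cons]
    by_cases hc : c = '-'
    · subst hc
      simp only [ih]
      rw [capRec, if_pos rfl, capSt]
      simp
    · simp only [if_neg hc, ih]
      rw [capRec, if_neg hc, capSt, if_neg hc]
      simp

lemma capWordB_eq (w : List Char) : capWordB w = capRec true w := by
  rw [capWordB, capB_fold w [] true]
  simp

lemma map_sub_nospace (a : List Char) (h : ∀ c ∈ a, c ≠ ' ') :
    a.map (fun c => if c = ' ' then '_' else c) = a := by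
  calc a.map (fun c => if c = ' ' then '_' else c)
      = a.map id := List.map_congr_left (fun c hc => if_neg (h c hc))
    _ = a := List.map_id a

lemma join_map_sub (parts : List (List Char)) (h : ∀ t ∈ parts, ∀ c ∈ t, c ≠ ' ') :
    (PySem.Chars.join [' '] parts).map (fun c => if c = ' ' then '_' else c)
      = PySem.Chars.join ['_'] parts := by
  induction parts with
  | nil => rfl
  | cons a rest ih =>
    cases rest with
    | nil =>
      rw [PySem.Chars.join_singleton, PySem.Chars.join_singleton]
      exact map_sub_nospace a (h a (by simp))
    | cons b r =>
      rw [PySem.Chars.join_cons_cons, PySem.Chars.join_cons_cons, List.map_append,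
        List.map_append, map_sub_nospace a (h a (by simp)),
        ih (fun t ht => h t (List.mem_cons_of_mem _ ht))]
      rfl

lemma mem_enumerate {α : Type} (xs : List α) : ∀ (st i : ℤ) (w : α),
    (i, w) ∈ PySem.List.enumerate xs st → w ∈ xs := by
  induction xs with
  | nil => intro st i w h; simp [PySem.List.enumerate] at h
  | cons x t ih =>
    intro st i w h
    rw [show PySem.List.enumerate (x :: t) st = (st, x) :: PySem.List.enumerate t (st + 1) from rfl] at h
    rcases List.mem_cons.mp h with h0 | h0
    · injection h0 with h1 h2; subst h2; exact List.mem_cons_self ..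
    · exact List.mem_cons_of_mem _ (ih (st + 1) i w h0)

-- ===== VERDICT (by name: the statement is the Claim_ definition above) =====
theorem build_fandom_gif_file_spec : Claim_equal_build_fandom_gif_file := by
  intro name _
  unfold Spec_build_fandom_gif_file build_fandom_gif_file build_fandom_gif_file_alt
  by_cases hn : name = ""
  · rw [if_pos hn, if_pos hn]
  · rw [if_neg hn, if_neg hn]
    simp only [split₀_strip]
    have hinner : ∀ w : List Char,
        PySem.Chars.join ['-'] (List.foldl (fun (a : List (List Char)) seg =>
          if seg.isEmpty = true then a ++ [seg]
          else a ++ [PySem.Chars.upper (PySem.Chars.slice seg none (some 1)) ++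
                     PySem.Chars.lower (PySem.Chars.slice seg (some 1))]) []
          (PySem.Chars.splitOn w ['-'])) = capRec true w := by
      intro w
      rw [show (fun (a : List (List Char)) seg =>
            if seg.isEmpty = true then a ++ [seg]
            else a ++ [PySem.Chars.upper (PySem.Chars.slice seg none (some 1)) ++
                       PySem.Chars.lower (PySem.Chars.slice seg (some 1))])
          = (fun (a : List (List Char)) seg => a ++ [capA seg]) from
        funext fun a => funext fun seg => by rw [capA]; split_ifs <;> rfl]
      rw [PySem.List.foldl_append_singleton_eq_map, List.nil_append, splitOn_single]
      exact word_eq w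
    simp only [hinner, lower_capRec, capWordB_eq]
    have hns : ∀ t ∈ PySem.Chars.split₀ name.toList, ∀ c ∈ t, c ≠ ' ' := by
      intro t ht c hc he
      have := split₀_nospace name.toList t ht c hc
      rw [he] at this
      exact absurd this (by decide)
    by_cases hT0 : PySem.Chars.split₀ name.toList = []
    · rw [hT0]
      decide
    · have hword : PySem.Chars.splitOn (PySem.Chars.join [' '] (PySem.Chars.split₀ name.toList)) [' ']
          = PySem.Chars.split₀ name.toList := by
        rw [splitOn_single]
        exact List.splitOn_intercalate _ ' ' (fun t ht hm => hns t ht ' ' hm rfl) hT0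
      rw [hword]
      rw [PySem.List.foldl_append_singleton_eq_map, List.nil_append]
      rw [replace_map, join_map_sub]
      intro t ht
      obtain ⟨iw, hiw, rfl⟩ := List.mem_map.mp ht
      obtain ⟨i, w⟩ := iw
      have hw : w ∈ PySem.Chars.split₀ name.toList := mem_enumerate _ 0 i w hiw
      dsimp only
      split_ifs
      · exact lower_nospace w (hns w hw)
      · exact capRec_nospace w (hns w hw) true
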